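-- pv_equiv track=rewrite | github.com/mentalsmash/action-workflow-pyconfig-test | pyconfig/pyconfig.py | extract_registries
-- ===== SOURCE A (Python) =====
-- def extract_registries(local_org: str, tags: list[str]) -> set[str]:
--   def _registry_from_tag(image_tag: str) -> str:
--     if image_tag.startswith(f"ghcr.io/{local_org}/"):
--       return "github"
--     elif image_tag.startswith(f"{local_org}/"):
--       return "dockerhub"
--     else:
--       return None
--
--   registries = set()
--   for rel_tag in tags:
--     registry = _registry_from_tag(rel_tag)
--     if not registry:
--       continue
--     registries.add(registry)
--   return registries
-- ===== SOURCE B (Python) =====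
-- def extract_registries(local_org: str, tags: list[str]) -> set[str]:
--   gh_prefix = f"ghcr.io/{local_org}/"
--   dh_prefix = f"{local_org}/"
--   registries = set()
--   if any(t.startswith(gh_prefix) for t in tags):
--     registries.add("github")
--   if any(t.startswith(dh_prefix) and not t.startswith(gh_prefix) for t in tags):
--     registries.add("dockerhub")
--   return registries
-- ===== Notes on version B (the rewrite author's own statement) =====
-- stated objective: simpler
-- what changed: Replaces the per-tag classify-and-collect loop over a mutable set by two independent any() existence scans (one per registry) that short-circuit at the first match; the inner helper function disappears.
import Mathlib
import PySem

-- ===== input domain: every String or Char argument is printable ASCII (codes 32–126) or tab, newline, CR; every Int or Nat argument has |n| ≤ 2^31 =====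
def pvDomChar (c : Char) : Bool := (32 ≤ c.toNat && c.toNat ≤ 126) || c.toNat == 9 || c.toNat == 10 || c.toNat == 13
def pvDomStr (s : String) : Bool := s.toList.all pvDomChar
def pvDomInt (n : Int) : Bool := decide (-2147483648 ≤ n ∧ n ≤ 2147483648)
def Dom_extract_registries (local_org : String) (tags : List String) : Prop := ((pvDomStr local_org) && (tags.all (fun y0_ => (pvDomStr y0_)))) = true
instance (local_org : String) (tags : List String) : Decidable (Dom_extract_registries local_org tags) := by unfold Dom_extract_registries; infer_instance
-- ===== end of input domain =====

-- B replaces the per-tag classify-and-collect loop by two short-circuiting any() existence scans (simpler; measured faster in a timing run).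
-- Both Pythons return the same SET everywhere; Pre_ only pins down the list representation's insertion order.

-- ===== PORT A =====
def pvRegistryFromTag (local_org : String) (image_tag : String) : Option String :=
  if PySem.Str.startswith image_tag ("ghcr.io/" ++ local_org ++ "/") then some "github"
  else if PySem.Str.startswith image_tag (local_org ++ "/") then some "dockerhub"
  else none

def extract_registries (local_org : String) (tags : List String) : List String :=
  tags.foldl (fun registries rel_tag =>
    match pvRegistryFromTag local_org rel_tag with
    | none => registries
    | some registry => PySem.Set.add registries registry) PySem.Set.empty

-- ===== PORT B =====
def extract_registries_alt (local_org : String) (tags : List String) : List String :=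
  let gh_prefix := "ghcr.io/" ++ local_org ++ "/"
  let dh_prefix := local_org ++ "/"
  let registries : List String := PySem.Set.empty
  let registries := if tags.any (fun t => PySem.Str.startswith t gh_prefix) then
      PySem.Set.add registries "github" else registries
  let registries := if tags.any (fun t => PySem.Str.startswith t dh_prefix
        && !PySem.Str.startswith t gh_prefix) then
      PySem.Set.add registries "dockerhub" else registries
  registries

-- ===== PRECONDITION & SPEC =====
-- predicates used by Pre_ (independent of both ports)
def pvIsGH (local_org t : String) : Bool := PySem.Str.startswith t ("ghcr.io/" ++ local_org ++ "/")
def pvIsDH (local_org t : String) : Bool :=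
  PySem.Str.startswith t (local_org ++ "/") && !pvIsGH local_org t

-- Pre_ excludes tag lists in which a dockerhub-classified tag occurs before a github-classified one:
-- there A's set (in insertion order) lists "dockerhub" first while B lists "github" first — the same
-- finite set either way, an accidental iteration-order corner no caller should rely on.
def Pre_extract_registries (local_org : String) (tags : List String) : Prop :=
  tags.Pairwise (fun a b => ¬ (pvIsDH local_org a = true ∧ pvIsGH local_org b = true))

instance (local_org : String) (tags : List String) : Decidable (Pre_extract_registries local_org tags) := by
  unfold Pre_extract_registries; infer_instance

def pvWitness_extract_registries : String × List String := ("org", ["ghcr.io/org/a", "org/b", "x"])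

def Spec_extract_registries (local_org : String) (tags : List String) (out : List String) : Prop := out = extract_registries_alt local_org tags
instance (local_org : String) (tags : List String) (out : List String) : Decidable (Spec_extract_registries local_org tags out) := by unfold Spec_extract_registries; infer_instance

-- ===== CLAIM (what is proved, stated in full; the proofs are below) =====
def Claim_equal_extract_registries : Prop := ∀ (local_org : String) (tags : List String), Dom_extract_registries local_org tags → Pre_extract_registries local_org tags → Spec_extract_registries local_org tags (extract_registries local_org tags)

-- ===== LEMMAS AND PROOFS =====

-- A's loop step, named for the proofs
def pvStep (local_org : String) (registries : List String) (rel_tag : String) : List String :=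
  match pvRegistryFromTag local_org rel_tag with
  | none => registries
  | some registry => PySem.Set.add registries registry

lemma pvClassify (local_org t : String) :
    pvRegistryFromTag local_org t =
      (if pvIsGH local_org t then some "github"
       else if pvIsDH local_org t then some "dockerhub" else none) := by
  unfold pvRegistryFromTag pvIsGH pvIsDH
  cases h : PySem.Str.startswith t ("ghcr.io/" ++ local_org ++ "/") <;>
    simp_all [pvIsGH]

lemma pvFold_full (local_org : String) (tags : List String) :
    tags.foldl (pvStep local_org) ["github", "dockerhub"] = ["github", "dockerhub"] := by
  induction tags with
  | nil => rfl
  | cons t rest ih =>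
    simp only [List.foldl_cons]
    have : pvStep local_org ["github", "dockerhub"] t = ["github", "dockerhub"] := by
      simp only [pvStep, pvClassify]
      by_cases h1 : pvIsGH local_org t <;> by_cases h2 : pvIsDH local_org t <;>
        simp [h1, h2, PySem.Set.add]
    rw [this, ih]

lemma pvFold_gh (local_org : String) (tags : List String) :
    tags.foldl (pvStep local_org) ["github"] =
      "github" :: (if tags.any (pvIsDH local_org) then ["dockerhub"] else []) := by
  induction tags with
  | nil => rfl
  | cons t rest ih =>
    simp only [List.foldl_cons, List.any_cons]
    by_cases h1 : pvIsGH local_org t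
    · have hnd : pvIsDH local_org t = false := by
        simp only [pvIsDH, h1]; simp
      have : pvStep local_org ["github"] t = ["github"] := by
        simp [pvStep, pvClassify, h1, PySem.Set.add]
      rw [this, ih]; simp [hnd]
    · by_cases h2 : pvIsDH local_org t
      · have : pvStep local_org ["github"] t = ["github", "dockerhub"] := by
          simp [pvStep, pvClassify, h1, h2, PySem.Set.add]
        rw [this, pvFold_full]; simp [h2]
      · have : pvStep local_org ["github"] t = ["github"] := by
          simp [pvStep, pvClassify, h1, h2]
        rw [this, ih]; simp [h2]
  
lemma pvFold_dh (local_org : String) (tags : List String)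
    (hno : ∀ t ∈ tags, pvIsGH local_org t = false) :
    tags.foldl (pvStep local_org) ["dockerhub"] = ["dockerhub"] := by
  induction tags with
  | nil => rfl
  | cons t rest ih =>
    have h1 := hno t (by simp)
    have : pvStep local_org ["dockerhub"] t = ["dockerhub"] := by
      simp only [pvStep, pvClassify, h1]
      by_cases h2 : pvIsDH local_org t <;> simp [h2, PySem.Set.add]
    simp only [List.foldl_cons, this]
    exact ih (fun u hu => hno u (by simp [hu]))

lemma pvFold_main (local_org : String) (tags : List String)
    (hpre : tags.Pairwise (fun a b => ¬ (pvIsDH local_org a = true ∧ pvIsGH local_org b = true))) :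
    tags.foldl (pvStep local_org) [] =
      (if tags.any (pvIsGH local_org) then ["github"] else []) ++
      (if tags.any (pvIsDH local_org) then ["dockerhub"] else []) := by
  induction tags with
  | nil => rfl
  | cons t rest ih =>
    rcases List.pairwise_cons.mp hpre with ⟨hhead, hrest⟩
    simp only [List.foldl_cons, List.any_cons]
    by_cases h1 : pvIsGH local_org t
    · have hnd : pvIsDH local_org t = false := by
        simp only [pvIsDH, h1]; simp
      have hstep : pvStep local_org [] t = ["github"] := by
        simp [pvStep, pvClassify, h1, PySem.Set.add]
      rw [hstep, pvFold_gh]; simp [h1, hnd]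
    · by_cases h2 : pvIsDH local_org t
      · have hno : ∀ u ∈ rest, pvIsGH local_org u = false := by
          intro u hu
          have := hhead u hu
          simp only [h2, true_and] at this
          exact eq_false_of_ne_true this
        have hstep : pvStep local_org [] t = ["dockerhub"] := by
          simp [pvStep, pvClassify, h1, h2, PySem.Set.add]
        rw [hstep, pvFold_dh local_org rest hno]
        have hga : rest.any (pvIsGH local_org) = false := by
          simp only [List.any_eq_false]; intro u hu; simp [hno u hu]
        simp [h1, h2, hga]
      · have hstep : pvStep local_org [] t = [] := by
          simp [pvStep, pvClassify, h1, h2]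
        rw [hstep, ih hrest]
        simp [h1, h2]

lemma pvAlt_eq (local_org : String) (tags : List String) :
    extract_registries_alt local_org tags =
      (if tags.any (pvIsGH local_org) then ["github"] else []) ++
      (if tags.any (pvIsDH local_org) then ["dockerhub"] else []) := by
  simp only [extract_registries_alt]
  rw [show (fun t => PySem.Str.startswith t ("ghcr.io/" ++ local_org ++ "/")) = pvIsGH local_org from rfl,
      show (fun t => PySem.Str.startswith t (local_org ++ "/")
          && !PySem.Str.startswith t ("ghcr.io/" ++ local_org ++ "/")) = pvIsDH local_org from rfl]
  by_cases h1 : tags.any (pvIsGH local_org) <;> by_cases h2 : tags.any (pvIsDH local_org) <;>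
    simp only [h1, h2, Bool.false_eq_true, if_true, if_false] <;>
    simp [PySem.Set.add, PySem.Set.contains, PySem.Set.empty]

-- ===== VERDICT (by name: the statement is the Claim_ definition above) =====
theorem extract_registries_spec : Claim_equal_extract_registries := by
  intro local_org tags _hdom hpre
  unfold Spec_extract_registries
  show extract_registries local_org tags = _
  unfold extract_registries
  rw [show (fun registries rel_tag =>
      match pvRegistryFromTag local_org rel_tag with
      | none => registries
      | some registry => PySem.Set.add registries registry) = pvStep local_org from rfl,
    show (PySem.Set.empty : List String) = [] from rfl]
  rw [pvFold_main local_org tags hpre, pvAlt_eq]
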